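-- pv_equiv track=rewrite | github.com/gaponas/sd_2022_gapon | src/commands/wc.py | count_for_one
-- ===== SOURCE A (Python) =====
-- def count_for_one(text):
--     file_lines = 0
--     file_words = 0
--     file_bytes = 0
--     for line in text:
--         file_lines += 1
--         file_words += len(line.split())
--         file_bytes += len(line)
--     return file_lines, file_words, file_bytes
-- ===== SOURCE B (Python) =====
-- def count_for_one(text):
--     lines = words = nbytes = 0
--     for line in text:
--         lines += 1
--         in_word = False
--         for ch in line:
--             nbytes += 1
--             if ch.isspace():
--                 in_word = False
--             elif not in_word:
--                 in_word = True
--                 words += 1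
--     return lines, words, nbytes
-- ===== Notes on version B (the rewrite author's own statement) =====
-- stated objective: alternative
-- what changed: Word counting no longer materializes the token list via line.split(); B runs a character-level state machine that counts whitespace-to-nonword transitions (word starts), counting bytes in the same character scan.
import Mathlib
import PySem

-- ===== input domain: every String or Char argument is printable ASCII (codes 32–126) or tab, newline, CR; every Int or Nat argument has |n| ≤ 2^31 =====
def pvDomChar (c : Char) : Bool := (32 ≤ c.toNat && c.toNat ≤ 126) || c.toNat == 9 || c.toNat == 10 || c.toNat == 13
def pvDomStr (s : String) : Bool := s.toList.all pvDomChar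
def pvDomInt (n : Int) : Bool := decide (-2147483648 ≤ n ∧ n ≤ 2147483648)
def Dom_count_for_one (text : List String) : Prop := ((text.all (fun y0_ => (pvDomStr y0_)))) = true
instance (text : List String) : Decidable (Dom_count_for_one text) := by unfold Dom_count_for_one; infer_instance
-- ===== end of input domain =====

-- B replaces A's per-line `len(line.split())` word counting (which builds the token list)
-- by a character-level state machine counting word starts; objective: alternative.

-- ===== PORT A =====
-- one fold over the lines carrying the triple (file_lines, file_words, file_bytes);
-- len(line.split()) is PySem.List.len (PySem.Str.split₀ line)
def count_for_one (text : List String) : Int × Int × Int :=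
  text.foldl
    (fun acc line =>
      (acc.1 + 1,
       acc.2.1 + PySem.List.len (PySem.Str.split₀ line),
       acc.2.2 + PySem.Str.len line))
    (0, 0, 0)

-- ===== PORT B =====
-- inner loop of Source B: per character, bytes += 1, then the isspace / word-start branch
-- carrying (in_word, words, bytes)
def pvLineStep (st : Bool × Int × Int) (ch : Char) : Bool × Int × Int :=
  let b := st.2.2 + 1
  if PySem.Chars.isspace ch then (false, st.2.1, b)
  else if !st.1 then (true, st.2.1 + 1, b)
  else (st.1, st.2.1, b)

def count_for_one_alt (text : List String) : Int × Int × Int :=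
  text.foldl
    (fun acc line =>
      let r := line.toList.foldl pvLineStep (false, acc.2.1, acc.2.2)
      (acc.1 + 1, r.2.1, r.2.2))
    (0, 0, 0)

-- ===== PRECONDITION & SPEC =====
def Spec_count_for_one (text : List String) (out : Int × Int × Int) : Prop := out = count_for_one_alt text
instance (text : List String) (out : Int × Int × Int) : Decidable (Spec_count_for_one text out) := by unfold Spec_count_for_one; infer_instance

-- ===== CLAIM (what is proved, stated in full; the proofs are below) =====
def Claim_equal_count_for_one : Prop := ∀ (text : List String), Dom_count_for_one text → Spec_count_for_one text (count_for_one text)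

-- ===== LEMMAS AND PROOFS =====

-- word count of a character list by the state machine, starting in state `inw`
def pvWords (cs : List Char) (inw : Bool) : Nat :=
  match cs with
  | [] => 0
  | c :: rest =>
      if PySem.Chars.isspace c then pvWords rest false
      else (if inw then 0 else 1) + pvWords rest true

-- final in-word state of the machine
def pvEnd (cs : List Char) (inw : Bool) : Bool :=
  match cs with
  | [] => inw
  | c :: rest => pvEnd rest (if PySem.Chars.isspace c then false else true)

-- the inner char fold computes (end state, words added, bytes added)
theorem lineFold_eq (cs : List Char) : ∀ (inw : Bool) (w b : Int),
    cs.foldl pvLineStep (inw, w, b) = (pvEnd cs inw, w + pvWords cs inw, b + cs.length) := by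
  induction cs with
  | nil => intro inw w b; simp [pvEnd, pvWords]
  | cons c rest ih =>
      intro inw w b
      rw [List.foldl_cons]
      by_cases hs : PySem.Chars.isspace c = true
      · rw [show pvLineStep (inw, w, b) c = (false, w, b + 1) by
          simp [pvLineStep, hs]]
        rw [ih]
        simp [pvEnd, pvWords, hs]
        ring
      · cases inw with
        | false =>
            rw [show pvLineStep (false, w, b) c = (true, w + 1, b + 1) by
              simp [pvLineStep, hs]]
            rw [ih]
            simp [pvEnd, pvWords, hs]
            constructor
            · ring
            · ring
        | true =>
            rw [show pvLineStep (true, w, b) c = (true, w, b + 1) by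
              simp [pvLineStep, hs]]
            rw [ih]
            simp [pvEnd, pvWords, hs]
            ring

-- length of split₀'s worker in terms of the state machine
theorem splitGo_length (cs : List Char) : ∀ (cur : List Char) (acc : List (List Char)),
    (PySem.Chars.split₀.go cs cur acc).length
      = acc.length + (if cur.isEmpty then 0 else 1) + pvWords cs (!cur.isEmpty) := by
  induction cs with
  | nil =>
      intro cur acc
      cases cur <;> simp [PySem.Chars.split₀.go, pvWords, List.isEmpty]
  | cons c rest ih =>
      intro cur acc
      by_cases hs : PySem.Chars.isspace c = true
      · cases cur with
        | nil =>
            rw [show PySem.Chars.split₀.go (c :: rest) [] acc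
                  = PySem.Chars.split₀.go rest [] acc by
              simp [PySem.Chars.split₀.go, hs]]
            rw [ih]
            simp [pvWords, hs]
        | cons x xs =>
            rw [show PySem.Chars.split₀.go (c :: rest) (x :: xs) acc
                  = PySem.Chars.split₀.go rest [] (((x :: xs).reverse) :: acc) by
              simp [PySem.Chars.split₀.go, hs]]
            rw [ih]
            simp [pvWords, hs]
      · rw [show PySem.Chars.split₀.go (c :: rest) cur acc
              = PySem.Chars.split₀.go rest (c :: cur) acc by
          simp [PySem.Chars.split₀.go, hs]]
        rw [ih]
        cases cur <;> simp [pvWords, hs]; omega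

-- A's per-line word count equals the state machine from the out-of-word state
theorem split₀_len_eq (line : String) :
    (PySem.Str.split₀ line).length = pvWords line.toList false := by
  simp [PySem.Str.split₀, PySem.Chars.split₀]
  rw [splitGo_length]
  simp

theorem ports_eq (text : List String) : count_for_one text = count_for_one_alt text := by
  unfold count_for_one count_for_one_alt
  induction text using List.reverseRecOn with
  | nil => rfl
  | append_singleton xs x ih =>
      rw [List.foldl_append, List.foldl_append, ih]
      simp only [List.foldl_cons, List.foldl_nil]
      rw [lineFold_eq]
      simp [PySem.List.len_eq, split₀_len_eq, PySem.Str.len]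

-- ===== VERDICT (by name: the statement is the Claim_ definition above) =====
theorem count_for_one_spec : Claim_equal_count_for_one := by
  intro text _
  exact ports_eq text
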